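-- pv_equiv track=rewrite | github.com/marcotownson/wow-backup | archive/phase3/fixed_width_binary_analyzer.py | detect_reactions
-- ===== SOURCE A (Python) =====
-- from typing import List, Tuple, Dict, Optional
--
-- def detect_reactions(symbols: List[str]) -> List[Tuple[int, str]]:
--     """Detect simple motif-based reactions in the symbol stream (by token index).
--     These are *motifs*, not balanced chemistry.
--     """
--     rxns: List[Tuple[int, str]] = []
--     # Sliding windows
--     for i in range(len(symbols)):
--         a = symbols[i] if i < len(symbols) else None
--         b = symbols[i+1] if i+1 < len(symbols) else None
--         c = symbols[i+2] if i+2 < len(symbols) else None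
--         d = symbols[i+3] if i+3 < len(symbols) else None
--         e = symbols[i+4] if i+4 < len(symbols) else None
--
--         # Fusion-like motifs
--         if a == "H" and b == "He":
--             rxns.append((i, "H → He (fusion motif)"))
--         if a == "H" and b == "H" and c == "He":
--             rxns.append((i, "H2 → He (fusion motif)"))
--
--         # Common molecules (motifs)
--         if a == "C" and b == "O" and c == "O":
--             rxns.append((i, "CO2 motif"))
--         if a == "N" and b == "H" and c == "H" and d == "H":
--             rxns.append((i, "NH3 motif"))
--         if a == "C" and b == "H" and c == "H" and d == "H" and e == "H":
--             rxns.append((i, "CH4 motif"))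
--         if a == "H" and b == "H" and c == "O":
--             rxns.append((i, "H2O motif"))
--         if a == "Na" and b == "Cl":
--             rxns.append((i, "NaCl motif"))
--     return rxns
-- ===== SOURCE B (Python) =====
-- from typing import List, Tuple, Dict
--
-- # Motif table in A's check order.
-- _MOTIFS: List[Tuple[Tuple[str, ...], str]] = [
--     (("H", "He"), "H → He (fusion motif)"),
--     (("H", "H", "He"), "H2 → He (fusion motif)"),
--     (("C", "O", "O"), "CO2 motif"),
--     (("N", "H", "H", "H"), "NH3 motif"),
--     (("C", "H", "H", "H", "H"), "CH4 motif"),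
--     (("H", "H", "O"), "H2O motif"),
--     (("Na", "Cl"), "NaCl motif"),
-- ]
--
-- def detect_reactions(symbols: List[str]) -> List[Tuple[int, str]]:
--     """Three stages: scan motif-by-motif for hit positions, group the hits into an
--     index-keyed table, then emit them back in index order."""
--     n = len(symbols)
--     # Stage 1: motif-major scan — all (position, label) hits, grouped by motif.
--     pairs = [(i, label)
--              for motif, label in _MOTIFS
--              for i in range(n - len(motif) + 1)
--              if all(symbols[i + j] == motif[j] for j in range(len(motif)))]
--     # Stage 2: invert into a table keyed by position (labels keep motif order).
--     hits: Dict[int, List[str]] = {}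
--     for i, label in pairs:
--         hits[i] = hits.get(i, []) + [label]
--     # Stage 3: emit index-major.
--     return [(i, lab) for i in range(n) for lab in hits.get(i, [])]
-- ===== Notes on version B (the rewrite author's own statement) =====
-- stated objective: alternative
-- what changed: Replaces A's single index-major pass with hardcoded window checks by three staged passes: a motif-major scan collecting all (position,label) hits from a motif table, grouping them into a position-keyed dictionary, and an index-major emit from that inverted index.
import Mathlib
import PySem

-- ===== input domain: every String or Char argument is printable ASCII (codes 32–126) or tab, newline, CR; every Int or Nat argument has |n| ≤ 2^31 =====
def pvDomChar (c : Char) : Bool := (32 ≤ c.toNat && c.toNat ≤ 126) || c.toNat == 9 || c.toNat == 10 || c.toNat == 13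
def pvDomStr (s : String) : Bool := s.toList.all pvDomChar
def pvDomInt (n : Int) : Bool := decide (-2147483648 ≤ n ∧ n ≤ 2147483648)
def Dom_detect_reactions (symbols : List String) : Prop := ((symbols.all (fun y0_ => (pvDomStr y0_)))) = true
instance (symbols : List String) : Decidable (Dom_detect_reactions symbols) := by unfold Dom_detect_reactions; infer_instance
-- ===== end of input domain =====

-- B replaces A's single index-major pass of hardcoded window checks by three staged
-- passes (motif-major scan, grouping into a position-keyed dict, index-major emit);
-- objective: alternative — same output on every input.

-- ===== PORT A =====
def detect_reactions (symbols : List String) : List (Int × String) :=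
  (PySem.List.pyRange 0 (symbols.length : Int) 1).foldl (fun rxns i =>
    let n : Int := (symbols.length : Int)
    let a := if i < n then PySem.List.pyGet? symbols i else none
    let b := if i + 1 < n then PySem.List.pyGet? symbols (i + 1) else none
    let c := if i + 2 < n then PySem.List.pyGet? symbols (i + 2) else none
    let d := if i + 3 < n then PySem.List.pyGet? symbols (i + 3) else none
    let e := if i + 4 < n then PySem.List.pyGet? symbols (i + 4) else none
    let r1 := if a = some "H" ∧ b = some "He" then rxns ++ [(i, "H → He (fusion motif)")] else rxns
    let r2 := if a = some "H" ∧ b = some "H" ∧ c = some "He" then r1 ++ [(i, "H2 → He (fusion motif)")] else r1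
    let r3 := if a = some "C" ∧ b = some "O" ∧ c = some "O" then r2 ++ [(i, "CO2 motif")] else r2
    let r4 := if a = some "N" ∧ b = some "H" ∧ c = some "H" ∧ d = some "H" then r3 ++ [(i, "NH3 motif")] else r3
    let r5 := if a = some "C" ∧ b = some "H" ∧ c = some "H" ∧ d = some "H" ∧ e = some "H" then r4 ++ [(i, "CH4 motif")] else r4
    let r6 := if a = some "H" ∧ b = some "H" ∧ c = some "O" then r5 ++ [(i, "H2O motif")] else r5
    let r7 := if a = some "Na" ∧ b = some "Cl" then r6 ++ [(i, "NaCl motif")] else r6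
    r7) []

-- ===== PORT B =====
def pvMotifs : List (List String × String) :=
  [(["H", "He"], "H → He (fusion motif)"),
   (["H", "H", "He"], "H2 → He (fusion motif)"),
   (["C", "O", "O"], "CO2 motif"),
   (["N", "H", "H", "H"], "NH3 motif"),
   (["C", "H", "H", "H", "H"], "CH4 motif"),
   (["H", "H", "O"], "H2O motif"),
   (["Na", "Cl"], "NaCl motif")]

def detect_reactions_alt (symbols : List String) : List (Int × String) :=
  let n : Int := (symbols.length : Int)
  -- Stage 1: motif-major scan — all (position, label) hits, grouped by motif.
  let pairs : List (Int × String) :=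
    pvMotifs.flatMap (fun ml =>
      ((PySem.List.pyRange 0 (n - (ml.1.length : Int) + 1) 1).filter (fun i =>
          (PySem.List.pyRange 0 (ml.1.length : Int) 1).all (fun j =>
            PySem.List.pyGet? symbols (i + j) == PySem.List.pyGet? ml.1 j))).map
        (fun i => (i, ml.2)))
  -- Stage 2: invert into a table keyed by position.
  let hits : PySem.Dict Int (List String) :=
    pairs.foldl (fun d p => d.modify p.1 [] (fun v => v ++ [p.2])) PySem.Dict.empty
  -- Stage 3: emit index-major.
  (PySem.List.pyRange 0 n 1).flatMap (fun i => (hits.getD i []).map (fun lab => (i, lab)))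

-- ===== PRECONDITION & SPEC =====
def Spec_detect_reactions (symbols : List String) (out : List (Int × String)) : Prop := out = detect_reactions_alt symbols
instance (symbols : List String) (out : List (Int × String)) : Decidable (Spec_detect_reactions symbols out) := by unfold Spec_detect_reactions; infer_instance

-- ===== CLAIM (what is proved, stated in full; the proofs are below) =====
def Claim_equal_detect_reactions : Prop := ∀ (symbols : List String), Dom_detect_reactions symbols → Spec_detect_reactions symbols (detect_reactions symbols)

-- ===== LEMMAS AND PROOFS =====

-- A's hits at one index, as a concatenation of seven conditional singletons
def pvHitsA (symbols : List String) (k : Nat) : List (Int × String) :=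
  (if symbols[k]? = some "H" ∧ symbols[k+1]? = some "He" then [((k : Int), "H → He (fusion motif)")] else []) ++
  (if symbols[k]? = some "H" ∧ symbols[k+1]? = some "H" ∧ symbols[k+2]? = some "He" then [((k : Int), "H2 → He (fusion motif)")] else []) ++
  (if symbols[k]? = some "C" ∧ symbols[k+1]? = some "O" ∧ symbols[k+2]? = some "O" then [((k : Int), "CO2 motif")] else []) ++
  (if symbols[k]? = some "N" ∧ symbols[k+1]? = some "H" ∧ symbols[k+2]? = some "H" ∧ symbols[k+3]? = some "H" then [((k : Int), "NH3 motif")] else []) ++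
  (if symbols[k]? = some "C" ∧ symbols[k+1]? = some "H" ∧ symbols[k+2]? = some "H" ∧ symbols[k+3]? = some "H" ∧ symbols[k+4]? = some "H" then [((k : Int), "CH4 motif")] else []) ++
  (if symbols[k]? = some "H" ∧ symbols[k+1]? = some "H" ∧ symbols[k+2]? = some "O" then [((k : Int), "H2O motif")] else []) ++
  (if symbols[k]? = some "Na" ∧ symbols[k+1]? = some "Cl" then [((k : Int), "NaCl motif")] else [])

-- A's guarded index collapses to getElem? (out of range gives none either way)
theorem pv_guard (xs : List String) (j : Int) (k : Nat) (hj : j = (k : Int)) :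
    (if j < (xs.length : Int) then PySem.List.pyGet? xs j else none) = xs[k]? := by
  subst hj
  rw [PySem.List.pyGet?_natCast]
  split
  · rfl
  · next h =>
    symm; rw [List.getElem?_eq_none_iff]
    exact_mod_cast Int.not_lt.mp h

-- one motif's contribution to pairs, restricted to position k, is a conditional singleton
theorem pv_term (b : Int) (cond : Int → Bool) (lab : String) (k : Nat) :
    (List.map (fun x => x.2) (List.filter (fun p => p.1 == (k : Int))
        (((PySem.List.pyRange 0 b 1).filter cond).map (fun i => (i, lab))))).map
      (fun l => ((k : Int), l))
    = if ((k : Int) < b ∧ cond (k : Int) = true) then [((k : Int), lab)] else [] := by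
  rw [List.filter_map]
  have hcomp : ((fun p : Int × String => p.1 == (k : Int)) ∘ (fun i => (i, lab)))
      = fun i : Int => i == (k : Int) := rfl
  rw [hcomp, List.filter_filter]
  have hsw : (List.filter (fun a => (a == (k : Int)) && cond a) (PySem.List.pyRange 0 b 1))
      = List.filter cond (List.filter (fun x => x == (k : Int)) (PySem.List.pyRange 0 b 1)) := by
    rw [List.filter_filter]
    exact List.filter_congr (fun a _ => by rw [Bool.and_comm])
  rw [hsw, List.filter_beq]
  by_cases hk : (k : Int) < b
  · have hmem : (k : Int) ∈ PySem.List.pyRange 0 b 1 :=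
      PySem.List.mem_pyRange_one.mpr ⟨by positivity, hk⟩
    rw [List.count_eq_one_of_mem (PySem.List.nodup_pyRange_one 0 b) hmem]
    by_cases hc : cond (k : Int) = true
    · simp [hc, hk]
    · simp [hc, hk]
  · have : (k : Int) ∉ PySem.List.pyRange 0 b 1 := by
      intro hmem; exact hk (PySem.List.mem_pyRange_one.mp hmem).2
    rw [List.count_eq_zero_of_not_mem this]
    simp [hk]

theorem pv_cond2 (symbols : List String) (k : Nat) (a b : String) :
    ((PySem.List.pyRange 0 (2:Int)).all (fun j => PySem.List.pyGet? symbols ((k:Int) + j) == PySem.List.pyGet? [a,b] j) = true)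
    ↔ (symbols[k]? = some a ∧ symbols[k+1]? = some b) := by
  have h : PySem.List.pyRange 0 (2:Int) = [0, 1] := by decide
  have e0 : PySem.List.pyGet? symbols ((k:Int) + 0) = symbols[k]? := by
    rw [show (k:Int) + 0 = ((k:Nat) : Int) by ring, PySem.List.pyGet?_natCast]
  have e1 : PySem.List.pyGet? symbols ((k:Int) + 1) = symbols[k+1]? := by
    rw [show (k:Int) + 1 = (((k+1:Nat)) : Int) by push_cast; ring, PySem.List.pyGet?_natCast]
  have g0 : PySem.List.pyGet? [a,b] (0:Int) = some a := rfl
  have g1 : PySem.List.pyGet? [a,b] (1:Int) = some b := rfl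
  rw [h]
  simp only [List.all_cons, List.all_nil, e0, e1, g0, g1, Bool.and_true, Bool.and_eq_true, beq_iff_eq]

theorem pv_cond3 (symbols : List String) (k : Nat) (a b c : String) :
    ((PySem.List.pyRange 0 (3:Int)).all (fun j => PySem.List.pyGet? symbols ((k:Int) + j) == PySem.List.pyGet? [a,b,c] j) = true)
    ↔ (symbols[k]? = some a ∧ symbols[k+1]? = some b ∧ symbols[k+2]? = some c) := by
  have h : PySem.List.pyRange 0 (3:Int) = [0, 1, 2] := by decide
  have e0 : PySem.List.pyGet? symbols ((k:Int) + 0) = symbols[k]? := by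
    rw [show (k:Int) + 0 = ((k:Nat) : Int) by ring, PySem.List.pyGet?_natCast]
  have e1 : PySem.List.pyGet? symbols ((k:Int) + 1) = symbols[k+1]? := by
    rw [show (k:Int) + 1 = (((k+1:Nat)) : Int) by push_cast; ring, PySem.List.pyGet?_natCast]
  have e2 : PySem.List.pyGet? symbols ((k:Int) + 2) = symbols[k+2]? := by
    rw [show (k:Int) + 2 = (((k+2:Nat)) : Int) by push_cast; ring, PySem.List.pyGet?_natCast]
  have g0 : PySem.List.pyGet? [a,b,c] (0:Int) = some a := rfl
  have g1 : PySem.List.pyGet? [a,b,c] (1:Int) = some b := rfl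
  have g2 : PySem.List.pyGet? [a,b,c] (2:Int) = some c := rfl
  rw [h]
  simp only [List.all_cons, List.all_nil, e0, e1, e2, g0, g1, g2, Bool.and_true, Bool.and_eq_true, beq_iff_eq]

theorem pv_cond4 (symbols : List String) (k : Nat) (a b c d : String) :
    ((PySem.List.pyRange 0 (4:Int)).all (fun j => PySem.List.pyGet? symbols ((k:Int) + j) == PySem.List.pyGet? [a,b,c,d] j) = true)
    ↔ (symbols[k]? = some a ∧ symbols[k+1]? = some b ∧ symbols[k+2]? = some c ∧ symbols[k+3]? = some d) := by
  have h : PySem.List.pyRange 0 (4:Int) = [0, 1, 2, 3] := by decide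
  have e0 : PySem.List.pyGet? symbols ((k:Int) + 0) = symbols[k]? := by
    rw [show (k:Int) + 0 = ((k:Nat) : Int) by ring, PySem.List.pyGet?_natCast]
  have e1 : PySem.List.pyGet? symbols ((k:Int) + 1) = symbols[k+1]? := by
    rw [show (k:Int) + 1 = (((k+1:Nat)) : Int) by push_cast; ring, PySem.List.pyGet?_natCast]
  have e2 : PySem.List.pyGet? symbols ((k:Int) + 2) = symbols[k+2]? := by
    rw [show (k:Int) + 2 = (((k+2:Nat)) : Int) by push_cast; ring, PySem.List.pyGet?_natCast]
  have e3 : PySem.List.pyGet? symbols ((k:Int) + 3) = symbols[k+3]? := by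
    rw [show (k:Int) + 3 = (((k+3:Nat)) : Int) by push_cast; ring, PySem.List.pyGet?_natCast]
  have g0 : PySem.List.pyGet? [a,b,c,d] (0:Int) = some a := rfl
  have g1 : PySem.List.pyGet? [a,b,c,d] (1:Int) = some b := rfl
  have g2 : PySem.List.pyGet? [a,b,c,d] (2:Int) = some c := rfl
  have g3 : PySem.List.pyGet? [a,b,c,d] (3:Int) = some d := rfl
  rw [h]
  simp only [List.all_cons, List.all_nil, e0, e1, e2, e3, g0, g1, g2, g3, Bool.and_true, Bool.and_eq_true, beq_iff_eq]

theorem pv_cond5 (symbols : List String) (k : Nat) (a b c d e : String) :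
    ((PySem.List.pyRange 0 (5:Int)).all (fun j => PySem.List.pyGet? symbols ((k:Int) + j) == PySem.List.pyGet? [a,b,c,d,e] j) = true)
    ↔ (symbols[k]? = some a ∧ symbols[k+1]? = some b ∧ symbols[k+2]? = some c ∧ symbols[k+3]? = some d ∧ symbols[k+4]? = some e) := by
  have h : PySem.List.pyRange 0 (5:Int) = [0, 1, 2, 3, 4] := by decide
  have e0 : PySem.List.pyGet? symbols ((k:Int) + 0) = symbols[k]? := by
    rw [show (k:Int) + 0 = ((k:Nat) : Int) by ring, PySem.List.pyGet?_natCast]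
  have e1 : PySem.List.pyGet? symbols ((k:Int) + 1) = symbols[k+1]? := by
    rw [show (k:Int) + 1 = (((k+1:Nat)) : Int) by push_cast; ring, PySem.List.pyGet?_natCast]
  have e2 : PySem.List.pyGet? symbols ((k:Int) + 2) = symbols[k+2]? := by
    rw [show (k:Int) + 2 = (((k+2:Nat)) : Int) by push_cast; ring, PySem.List.pyGet?_natCast]
  have e3 : PySem.List.pyGet? symbols ((k:Int) + 3) = symbols[k+3]? := by
    rw [show (k:Int) + 3 = (((k+3:Nat)) : Int) by push_cast; ring, PySem.List.pyGet?_natCast]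
  have e4 : PySem.List.pyGet? symbols ((k:Int) + 4) = symbols[k+4]? := by
    rw [show (k:Int) + 4 = (((k+4:Nat)) : Int) by push_cast; ring, PySem.List.pyGet?_natCast]
  have g0 : PySem.List.pyGet? [a,b,c,d,e] (0:Int) = some a := rfl
  have g1 : PySem.List.pyGet? [a,b,c,d,e] (1:Int) = some b := rfl
  have g2 : PySem.List.pyGet? [a,b,c,d,e] (2:Int) = some c := rfl
  have g3 : PySem.List.pyGet? [a,b,c,d,e] (3:Int) = some d := rfl
  have g4 : PySem.List.pyGet? [a,b,c,d,e] (4:Int) = some e := rfl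
  rw [h]
  simp only [List.all_cons, List.all_nil, e0, e1, e2, e3, e4, g0, g1, g2, g3, g4, Bool.and_true, Bool.and_eq_true, beq_iff_eq]

theorem pv_chain (c1 c2 c3 c4 c5 c6 c7 : Prop)
    [Decidable c1] [Decidable c2] [Decidable c3] [Decidable c4]
    [Decidable c5] [Decidable c6] [Decidable c7]
    (acc : List (Int × String)) (x1 x2 x3 x4 x5 x6 x7 : Int × String) :
    (let r1 := if c1 then acc ++ [x1] else acc
     let r2 := if c2 then r1 ++ [x2] else r1
     let r3 := if c3 then r2 ++ [x3] else r2
     let r4 := if c4 then r3 ++ [x4] else r3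
     let r5 := if c5 then r4 ++ [x5] else r4
     let r6 := if c6 then r5 ++ [x6] else r5
     let r7 := if c7 then r6 ++ [x7] else r6
     r7) = acc ++
      ((if c1 then [x1] else []) ++ (if c2 then [x2] else []) ++ (if c3 then [x3] else []) ++
       (if c4 then [x4] else []) ++ (if c5 then [x5] else []) ++ (if c6 then [x6] else []) ++
       (if c7 then [x7] else [])) := by
  split_ifs <;> simp

theorem pv_A_flat (symbols : List String) :
    detect_reactions symbols =
      (PySem.List.pyRange 0 (symbols.length : Int) 1).flatMap
        (fun i => pvHitsA symbols i.toNat) := by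
  unfold detect_reactions
  rw [PySem.List.foldl_congr_mem _ _
      (fun acc i => acc ++ pvHitsA symbols i.toNat) []
      (by
        intro acc i hi
        rw [PySem.List.mem_pyRange_one] at hi
        obtain ⟨h0, h1⟩ := hi
        obtain ⟨k, rfl⟩ : ∃ k : Nat, i = (k : Int) := ⟨i.toNat, (Int.toNat_of_nonneg h0).symm⟩
        simp only [Int.toNat_natCast, pvHitsA]
        rw [pv_guard symbols ((k : Int)) k rfl,
            pv_guard symbols ((k : Int) + 1) (k + 1) (by push_cast; ring),
            pv_guard symbols ((k : Int) + 2) (k + 2) (by push_cast; ring),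
            pv_guard symbols ((k : Int) + 3) (k + 3) (by push_cast; ring),
            pv_guard symbols ((k : Int) + 4) (k + 4) (by push_cast; ring)]
        exact pv_chain _ _ _ _ _ _ _ acc _ _ _ _ _ _ _)]
  rw [PySem.List.foldl_append_eq_flatMap]
  simp

theorem detect_reactions_eq (symbols : List String) :
    detect_reactions symbols = detect_reactions_alt symbols := by
  rw [pv_A_flat]
  unfold detect_reactions_alt
  simp only [PySem.Dict.getD_foldl_modify_append, PySem.Dict.getD_empty, List.nil_append]
  refine List.flatMap_congr ?_
  intro i hi
  rw [PySem.List.mem_pyRange_one] at hi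
  obtain ⟨h0, h1⟩ := hi
  obtain ⟨k, rfl⟩ : ∃ k : Nat, i = (k : Int) := ⟨i.toNat, (Int.toNat_of_nonneg h0).symm⟩
  simp only [Int.toNat_natCast, pvMotifs, List.flatMap_cons, List.flatMap_nil,
    List.append_nil, List.filter_append, List.map_append, List.length_cons,
    List.length_nil]
  rw [pv_term, pv_term, pv_term, pv_term, pv_term, pv_term, pv_term]
  simp only [Nat.reduceAdd, Nat.cast_ofNat, pv_cond2, pv_cond3, pv_cond4, pv_cond5]
  simp only [pvHitsA, List.append_assoc]
  refine congrArg₂ (· ++ ·) ?_ (congrArg₂ (· ++ ·) ?_ (congrArg₂ (· ++ ·) ?_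
    (congrArg₂ (· ++ ·) ?_ (congrArg₂ (· ++ ·) ?_ (congrArg₂ (· ++ ·) ?_ ?_)))))
  · exact if_congr (Iff.intro
      (fun hh => ⟨by have := (List.getElem?_eq_some_iff.mp hh.2).1; omega, hh⟩)
      And.right) rfl rfl
  · exact if_congr (Iff.intro
      (fun hh => ⟨by have := (List.getElem?_eq_some_iff.mp hh.2.2).1; omega, hh⟩)
      And.right) rfl rfl
  · exact if_congr (Iff.intro
      (fun hh => ⟨by have := (List.getElem?_eq_some_iff.mp hh.2.2).1; omega, hh⟩)
      And.right) rfl rfl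
  · exact if_congr (Iff.intro
      (fun hh => ⟨by have := (List.getElem?_eq_some_iff.mp hh.2.2.2).1; omega, hh⟩)
      And.right) rfl rfl
  · exact if_congr (Iff.intro
      (fun hh => ⟨by have := (List.getElem?_eq_some_iff.mp hh.2.2.2.2).1; omega, hh⟩)
      And.right) rfl rfl
  · exact if_congr (Iff.intro
      (fun hh => ⟨by have := (List.getElem?_eq_some_iff.mp hh.2.2).1; omega, hh⟩)
      And.right) rfl rfl
  · exact if_congr (Iff.intro
      (fun hh => ⟨by have := (List.getElem?_eq_some_iff.mp hh.2).1; omega, hh⟩)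
      And.right) rfl rfl

-- ===== VERDICT (by name: the statement is the Claim_ definition above) =====
theorem detect_reactions_spec : Claim_equal_detect_reactions := by
  intro symbols _
  unfold Spec_detect_reactions
  exact detect_reactions_eq symbols
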